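-- pv_equiv track=rewrite | github.com/saikumarkodukula/llm_engineering_class1 | rag_evaluation.py | normalize_tokens
-- ===== SOURCE A (Python) =====
-- from typing import Any, Dict, List, Sequence
--
-- STOPWORDS = {
--     "a",
--     "an",
--     "and",
--     "are",
--     "as",
--     "at",
--     "be",
--     "by",
--     "for",
--     "from",
--     "how",
--     "i",
--     "in",
--     "is",
--     "it",
--     "of",
--     "on",
--     "or",
--     "should",
--     "that",
--     "the",
--     "to",
--     "what",
--     "when",
--     "which",
--     "with",
-- }
--
-- def normalize_tokens(text: str) -> List[str]:
--     """
--     Convert free text into lowercase keyword tokens.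
--
--     Parameters:
--     - text: The raw text to normalize.
--
--     Returns:
--     - List[str]: Filtered tokens used by heuristic evaluators.
--     """
--     cleaned = []
--     for token in "".join(
--         character.lower() if character.isalnum() else " "
--         for character in text
--     ).split():
--         if token not in STOPWORDS and len(token) > 2:
--             cleaned.append(token)
--     return cleaned
-- ===== SOURCE B (Python) =====
-- from typing import List
--
-- STOPWORDS = frozenset({
--     "a", "an", "and", "are", "as", "at", "be", "by", "for", "from", "how",
--     "i", "in", "is", "it", "of", "on", "or", "should", "that", "the", "to",
--     "what", "when", "which", "with",
-- })
--
--
-- def normalize_tokens(text: str) -> List[str]: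
--     """Single index-scan over the raw text: extract maximal alnum runs
--     directly, without building a cleaned string or calling split()."""
--     tokens = []
--     i, n = 0, len(text)
--     while i < n:
--         if text[i].isalnum():
--             j = i
--             while j < n and text[j].isalnum():
--                 j += 1
--             token = text[i:j].lower()
--             if len(token) > 2 and token not in STOPWORDS:
--                 tokens.append(token)
--             i = j
--         else:
--             i += 1
--     return tokens
-- ===== Notes on version B (the rewrite author's own statement) =====
-- stated objective: alternative
-- what changed: B tokenizes in one index scan over the raw text, extracting maximal alnum runs directly, instead of A's build-a-cleaned-string-then-split pipeline that materialises an intermediate lowered string and splits it.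
import Mathlib
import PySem

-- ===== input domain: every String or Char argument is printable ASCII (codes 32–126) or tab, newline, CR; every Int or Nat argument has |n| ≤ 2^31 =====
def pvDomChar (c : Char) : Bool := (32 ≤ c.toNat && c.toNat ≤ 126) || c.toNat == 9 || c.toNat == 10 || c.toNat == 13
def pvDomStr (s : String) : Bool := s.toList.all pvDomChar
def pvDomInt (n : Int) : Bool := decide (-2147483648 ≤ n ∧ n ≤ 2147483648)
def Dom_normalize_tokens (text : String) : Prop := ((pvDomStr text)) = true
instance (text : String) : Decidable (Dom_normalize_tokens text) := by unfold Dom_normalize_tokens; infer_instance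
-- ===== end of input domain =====

-- B tokenizes in one index scan over the raw text, extracting maximal alnum runs directly,
-- instead of A's build-a-cleaned-string-then-split pipeline.

-- shared constant: the module-level STOPWORDS set
def pvStopwords : PySem.Set String := PySem.Set.ofList
  ["a", "an", "and", "are", "as", "at", "be", "by", "for", "from", "how",
   "i", "in", "is", "it", "of", "on", "or", "should", "that", "the", "to",
   "what", "when", "which", "with"]

-- ===== PORT A =====
def normalize_tokens (text : String) : List String :=
  let cleaned := String.ofList (text.toList.map
    (fun character => if PySem.Chars.isalnum character then PySem.Chars.lowerChar character else ' '))
  (PySem.Str.split₀ cleaned).foldl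
    (fun cleanedAcc token =>
      if !(pvStopwords.contains token) && decide (2 < PySem.Str.len token) then
        cleanedAcc ++ [token]
      else cleanedAcc)
    []

-- ===== PORT B =====
-- the while-loop index scan of Source B: a maximal alnum run is taken, lowered, filtered; other chars skipped
def altGo : List Char → List String
  | [] => []
  | c :: rest =>
    if PySem.Chars.isalnum c then
      let run := (c :: rest).takeWhile PySem.Chars.isalnum
      let rest' := (c :: rest).dropWhile PySem.Chars.isalnum
      let token := String.ofList (run.map PySem.Chars.lowerChar)
      if decide (2 < PySem.Str.len token) && !(pvStopwords.contains token) then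
        token :: altGo rest'
      else altGo rest'
    else altGo rest
termination_by cs => cs.length
decreasing_by
  all_goals
    simp only [List.dropWhile_cons, *, if_true, List.length_cons]
    first
      | exact Nat.lt_succ_of_le (List.length_dropWhile_le _ _)
      | omega

def normalize_tokens_alt (text : String) : List String := altGo text.toList

-- ===== PRECONDITION & SPEC =====
def Spec_normalize_tokens (text : String) (out : List String) : Prop := out = normalize_tokens_alt text
instance (text : String) (out : List String) : Decidable (Spec_normalize_tokens text out) := by unfold Spec_normalize_tokens; infer_instance

-- ===== CLAIM (what is proved, stated in full; the proofs are below) =====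
def Claim_equal_normalize_tokens : Prop := ∀ (text : String), Dom_normalize_tokens text → Spec_normalize_tokens text (normalize_tokens text)

-- ===== LEMMAS AND PROOFS =====

-- A's per-character replacement
def pvF (c : Char) : Char := if PySem.Chars.isalnum c then PySem.Chars.lowerChar c else ' '

-- the unfiltered maximal alnum runs, lowered (proof-side helper)
def pvRuns : List Char → List (List Char)
  | [] => []
  | c :: rest =>
    if PySem.Chars.isalnum c then
      ((c :: rest).takeWhile PySem.Chars.isalnum).map PySem.Chars.lowerChar
        :: pvRuns ((c :: rest).dropWhile PySem.Chars.isalnum)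
    else pvRuns rest
termination_by cs => cs.length
decreasing_by
  all_goals
    simp only [List.dropWhile_cons, *, if_true, List.length_cons]
    first
      | exact Nat.lt_succ_of_le (List.length_dropWhile_le _ _)
      | omega

theorem go_nil (cur : List Char) (acc : List (List Char)) :
    PySem.Chars.split₀.go [] cur acc =
      if cur.isEmpty then acc.reverse else (cur.reverse :: acc).reverse := rfl

theorem go_cons (c : Char) (rest cur : List Char) (acc : List (List Char)) :
    PySem.Chars.split₀.go (c :: rest) cur acc =
      if PySem.Chars.isspace c then
        (if cur.isEmpty then PySem.Chars.split₀.go rest [] acc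
         else PySem.Chars.split₀.go rest [] (cur.reverse :: acc))
      else PySem.Chars.split₀.go rest (c :: cur) acc := rfl

theorem lower_bounds (c : Char) (h : PySem.Chars.isalnum c = true) :
    48 ≤ (PySem.Chars.lowerChar c).toNat ∧ (PySem.Chars.lowerChar c).toNat ≤ 122 := by
  simp only [PySem.Chars.isalnum, PySem.Chars.isalpha, PySem.Chars.isupper, PySem.Chars.islower,
    PySem.Chars.isdigit, Bool.or_eq_true, Bool.and_eq_true, decide_eq_true_eq, Char.le_def,
    UInt32.le_iff_toNat_le] at h
  have e1 : ('A').val.toNat = 65 := rfl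
  have e2 : ('Z').val.toNat = 90 := rfl
  have e3 : ('a').val.toNat = 97 := rfl
  have e4 : ('z').val.toNat = 122 := rfl
  have e5 : ('0').val.toNat = 48 := rfl
  have e6 : ('9').val.toNat = 57 := rfl
  rw [e1, e2, e3, e4, e5, e6] at h
  have htn : c.toNat = c.val.toNat := rfl
  unfold PySem.Chars.lowerChar PySem.Chars.isupper
  by_cases hup : (decide ('A' ≤ c) && decide (c ≤ 'Z')) = true
  · simp only [hup, if_true]
    simp only [Bool.and_eq_true, decide_eq_true_eq, Char.le_def, UInt32.le_iff_toNat_le, e1, e2] at hup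
    have hv : (c.toNat + 32).isValidChar := by rw [htn]; simp [Nat.isValidChar]; omega
    have ht : (Char.ofNat (c.toNat + 32)).toNat = c.toNat + 32 := by
      simp [Char.ofNat, hv, Char.ofNatAux]; rw [htn]; omega
    rw [ht, htn]; omega
  · rw [if_neg hup]
    rw [htn]; omega

theorem isspace_lowerChar (c : Char) (h : PySem.Chars.isalnum c = true) :
    PySem.Chars.isspace (PySem.Chars.lowerChar c) = false := by
  obtain ⟨h1, h2⟩ := lower_bounds c h
  simp only [PySem.Chars.isspace, Bool.or_eq_false_iff, Bool.and_eq_false_iff,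
    decide_eq_false_iff_not]
  omega

theorem pvF_alnum (c : Char) (h : PySem.Chars.isalnum c = true) : pvF c = PySem.Chars.lowerChar c := by
  simp [pvF, h]

theorem pvF_not_alnum (c : Char) (h : PySem.Chars.isalnum c = false) : pvF c = ' ' := by
  simp [pvF, h]

theorem isspace_space : PySem.Chars.isspace ' ' = true := by decide

-- consuming an all-alnum run inside split₀.go
theorem go_run (run : List Char) (h : ∀ c ∈ run, PySem.Chars.isalnum c = true) :
    ∀ (rest cur : List Char) (acc : List (List Char)),
    PySem.Chars.split₀.go ((run ++ rest).map pvF) cur acc =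
      PySem.Chars.split₀.go (rest.map pvF) ((run.map PySem.Chars.lowerChar).reverse ++ cur) acc := by
  induction run with
  | nil => intro rest cur acc; simp
  | cons c t ih =>
    intro rest cur acc
    have hc : PySem.Chars.isalnum c = true := h c List.mem_cons_self
    simp only [List.cons_append, List.map_cons, pvF_alnum c hc, go_cons,
      isspace_lowerChar c hc]
    rw [ih (fun x hx => h x (List.mem_cons_of_mem _ hx)) rest (PySem.Chars.lowerChar c :: cur) acc]
    simp

theorem dropWhile_head_false {p : Char → Bool} {l t : List Char} {d : Char}
    (h : l.dropWhile p = d :: t) : p d = false := by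
  have := List.head?_dropWhile_not p l
  rw [h] at this
  simpa using this

-- split₀ of the cleaned character list yields exactly the lowered alnum runs
theorem go_pvRuns (n : Nat) : ∀ (cs : List Char), cs.length ≤ n → ∀ (acc : List (List Char)),
    PySem.Chars.split₀.go (cs.map pvF) [] acc = acc.reverse ++ pvRuns cs := by
  induction n with
  | zero =>
    intro cs hcs acc
    have : cs = [] := List.eq_nil_of_length_eq_zero (Nat.le_zero.mp hcs)
    subst this
    simp [go_nil, pvRuns]
  | succ n ih =>
    intro cs hcs acc
    match cs with
    | [] => simp [go_nil, pvRuns]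
    | c :: rest =>
      by_cases hc : PySem.Chars.isalnum c = true
      · -- alnum head: decompose into run ++ rest'
        have hsplit : (c :: rest).takeWhile PySem.Chars.isalnum ++ (c :: rest).dropWhile PySem.Chars.isalnum = c :: rest :=
          List.takeWhile_append_dropWhile
        set run := (c :: rest).takeWhile PySem.Chars.isalnum with hrun
        set rest' := (c :: rest).dropWhile PySem.Chars.isalnum with hrest'
        have hall : ∀ x ∈ run, PySem.Chars.isalnum x = true := fun x hx => List.mem_takeWhile_imp hx
        have hrunc : run = c :: rest.takeWhile PySem.Chars.isalnum := by
          simp [hrun, hc]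
        have hstep : PySem.Chars.split₀.go ((c :: rest).map pvF) [] acc =
            PySem.Chars.split₀.go (rest'.map pvF) ((run.map PySem.Chars.lowerChar).reverse ++ []) acc := by
          conv_lhs => rw [← hsplit]
          exact go_run run hall rest' [] acc
        rw [hstep]
        have hne : (run.map PySem.Chars.lowerChar).reverse ++ [] ≠ [] := by
          simp [hrunc]
        match hmr : rest' with
        | [] =>
          simp only [List.map_nil, go_nil]
          rw [if_neg (by simpa [List.isEmpty_iff] using hne)]
          have : pvRuns (c :: rest) = [run.map PySem.Chars.lowerChar] := by
            rw [pvRuns]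
            simp only [hc, if_true, ← hrun, ← hrest']
            rw [pvRuns]
          rw [this]
          simp
        | d :: rest2 =>
          have hdw : (c :: rest).dropWhile PySem.Chars.isalnum = d :: rest2 := by rw [← hrest']
          have hd : PySem.Chars.isalnum d = false := dropWhile_head_false hdw
          simp only [List.map_cons, pvF_not_alnum d hd, go_cons, isspace_space, if_true]
          rw [if_neg (by simpa [List.isEmpty_iff] using hne)]
          have hlen : rest2.length ≤ n := by
            have h1 : (d :: rest2).length ≤ rest.length := by
              rw [← hdw]
              simp only [List.dropWhile_cons, hc, if_true]
              exact List.length_dropWhile_le _ _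
            simp only [List.length_cons] at h1 hcs
            omega
          rw [ih rest2 hlen]
          have : pvRuns (c :: rest) = run.map PySem.Chars.lowerChar :: pvRuns rest2 := by
            rw [pvRuns]
            simp only [hc, if_true, ← hrun, hdw]
            rw [pvRuns]
            simp [hd]
          rw [this]
          simp
      · -- non-alnum head: a separator with empty current token
        have hc' : PySem.Chars.isalnum c = false := by simpa using hc
        simp only [List.map_cons, pvF_not_alnum c hc', go_cons, isspace_space, if_true,
          List.isEmpty_nil, if_true]
        rw [ih rest (by simp only [List.length_cons] at hcs; omega)]
        have : pvRuns (c :: rest) = pvRuns rest := by rw [pvRuns]; simp [hc']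
        rw [this]

-- B's scan equals filtering the lowered runs
theorem altGo_eq_filter (n : Nat) : ∀ (cs : List Char), cs.length ≤ n →
    altGo cs = ((pvRuns cs).map String.ofList).filter
      (fun token => decide (2 < PySem.Str.len token) && !(pvStopwords.contains token)) := by
  induction n with
  | zero =>
    intro cs hcs
    have : cs = [] := List.eq_nil_of_length_eq_zero (Nat.le_zero.mp hcs)
    subst this
    rw [altGo, pvRuns]
    simp
  | succ n ih =>
    intro cs hcs
    match cs with
    | [] => rw [altGo, pvRuns]; simp
    | c :: rest =>
      by_cases hc : PySem.Chars.isalnum c = true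
      · rw [altGo, pvRuns]
        simp only [hc, if_true]
        have hlen : ((c :: rest).dropWhile PySem.Chars.isalnum).length ≤ n := by
          have h1 : ((c :: rest).dropWhile PySem.Chars.isalnum).length ≤ rest.length := by
            simp only [List.dropWhile_cons, hc, if_true]
            exact List.length_dropWhile_le _ _
          simp only [List.length_cons] at hcs
          omega
        rw [ih _ hlen]
        simp [List.filter_cons]
      · have hc' : PySem.Chars.isalnum c = false := by simpa using hc
        rw [altGo, pvRuns]
        simp only [hc', Bool.false_eq_true, if_false]
        exact ih rest (by simp only [List.length_cons] at hcs; omega)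

-- ===== VERDICT (by name: the statement is the Claim_ definition above) =====
theorem normalize_tokens_spec : Claim_equal_normalize_tokens := by
  intro text _
  unfold Spec_normalize_tokens normalize_tokens normalize_tokens_alt
  simp only [PySem.Str.split₀, String.toList_ofList]
  have hmap : text.toList.map
      (fun character => if PySem.Chars.isalnum character then PySem.Chars.lowerChar character else ' ')
      = text.toList.map pvF := by
    simp [pvF]
  rw [hmap]
  have hgo : PySem.Chars.split₀ (text.toList.map pvF) = pvRuns text.toList := by
    unfold PySem.Chars.split₀
    simpa using go_pvRuns text.toList.length text.toList le_rfl []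
  rw [hgo]
  rw [PySem.List.foldl_append_if
    (fun token => !(pvStopwords.contains token) && decide (2 < PySem.Str.len token))
    (fun token => token) ((pvRuns text.toList).map String.ofList) []]
  rw [altGo_eq_filter text.toList.length text.toList le_rfl]
  simp only [List.nil_append, List.map_id']
  apply List.filter_congr
  intro x _
  exact Bool.and_comm _ _
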